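-- pv_equiv track=rewrite | github.com/mathortitas/Practica05 | Ejemplos/P05.py | contar_ceros_y_cincos
-- ===== SOURCE A (Python) =====
-- def contar_ceros_y_cincos(numero):
--     contador = 0
--     while numero > 0:
--         digito = numero % 10
--         if digito == 0 or digito == 5:
--             contador += 1
--         numero = numero // 10
--     return contador
-- ===== SOURCE B (Python) =====
-- def contar_ceros_y_cincos(numero):
--     if numero <= 0:
--         return 0
--     return sum(1 for c in str(numero) if c == '0' or c == '5')
-- ===== Notes on version B (the rewrite author's own statement) =====
-- stated objective: idiomatic
-- what changed: Replaces the arithmetic digit-peeling while-loop (% 10 and // 10) by a single scan over the decimal string representation, counting characters equal to '0' or '5'.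
import Mathlib
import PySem

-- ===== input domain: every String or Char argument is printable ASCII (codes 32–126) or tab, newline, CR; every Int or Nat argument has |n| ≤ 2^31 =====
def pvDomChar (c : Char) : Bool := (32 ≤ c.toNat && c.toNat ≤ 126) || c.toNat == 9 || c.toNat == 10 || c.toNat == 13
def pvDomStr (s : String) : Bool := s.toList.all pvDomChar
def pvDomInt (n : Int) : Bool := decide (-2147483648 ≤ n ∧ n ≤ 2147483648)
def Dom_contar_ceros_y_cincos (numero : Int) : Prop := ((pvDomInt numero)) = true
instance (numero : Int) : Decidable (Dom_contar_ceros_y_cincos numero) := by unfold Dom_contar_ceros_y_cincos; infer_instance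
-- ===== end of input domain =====

-- B replaces the arithmetic digit-peeling loop by a scan over str(numero) counting '0'/'5' characters (idiomatic, same cost).

-- ===== PORT A =====
-- the while-loop of A: state (numero, contador)
def contarA_go (numero : Int) (contador : Int) : Int :=
  if _h : numero > 0 then
    let digito := PySem.Int.mod numero 10
    contarA_go (PySem.Int.floordiv numero 10)
      (if digito = 0 ∨ digito = 5 then contador + 1 else contador)
  else contador
termination_by numero.toNat
decreasing_by
  rw [PySem.Int.floordiv_eq_ediv_of_pos (by norm_num)]
  omega

def contar_ceros_y_cincos (numero : Int) : Int := contarA_go numero 0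

-- ===== PORT B =====
def contar_ceros_y_cincos_alt (numero : Int) : Int :=
  if numero ≤ 0 then 0
  else (PySem.Int.toChars numero).foldl
    (fun acc c => if c = '0' ∨ c = '5' then acc + 1 else acc) 0

-- ===== PRECONDITION & SPEC =====
def Spec_contar_ceros_y_cincos (numero : Int) (out : Int) : Prop := out = contar_ceros_y_cincos_alt numero
instance (numero : Int) (out : Int) : Decidable (Spec_contar_ceros_y_cincos numero out) := by unfold Spec_contar_ceros_y_cincos; infer_instance

-- ===== CLAIM (what is proved, stated in full; the proofs are below) =====
def Claim_equal_contar_ceros_y_cincos : Prop := ∀ (numero : Int), Dom_contar_ceros_y_cincos numero → Spec_contar_ceros_y_cincos numero (contar_ceros_y_cincos numero)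

-- ===== LEMMAS AND PROOFS =====

def pvP : Char → Bool := fun ch => decide (ch = '0' ∨ ch = '5')

theorem contarA_go_nonpos (numero contador : Int) (h : ¬ numero > 0) :
    contarA_go numero contador = contador := by
  rw [contarA_go]; simp [h]

theorem contarA_go_spec (m : Nat) (hm : 0 < m) (c : Int) :
    contarA_go (m : Int) c = c + ((Nat.toDigits 10 m).countP pvP : Int) := by
  induction m using Nat.strong_induction_on generalizing c with
  | _ m ih =>
    rw [contarA_go]
    have hpos : (m : Int) > 0 := by exact_mod_cast hm
    simp only [hpos, dif_pos]
    have hmod : PySem.Int.mod (m : Int) 10 = ((m % 10 : Nat) : Int) := by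
      rw [PySem.Int.mod_eq_emod_of_pos (by norm_num)]; push_cast; rfl
    have hdiv : PySem.Int.floordiv (m : Int) 10 = ((m / 10 : Nat) : Int) := by
      rw [PySem.Int.floordiv_eq_ediv_of_pos (by norm_num)]; push_cast; rfl
    rw [hmod, hdiv]
    by_cases hlt : m < 10
    · have hdz : m / 10 = 0 := Nat.div_eq_of_lt hlt
      rw [hdz]
      rw [contarA_go_nonpos _ _ (by norm_num)]
      rw [Nat.toDigits_of_lt_base hlt]
      interval_cases m <;> simp [pvP, List.countP, List.countP.go, Nat.digitChar]
    · rw [not_lt] at hlt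
      have hdigits := Nat.toDigits_of_base_le (b := 10) (n := m) (by norm_num) hlt
      rw [hdigits, List.countP_append]
      have hdpos : 0 < m / 10 := Nat.div_pos hlt (by norm_num)
      rw [ih (m / 10) (Nat.div_lt_self hm (by norm_num)) hdpos]
      have hr : m % 10 < 10 := Nat.mod_lt _ (by norm_num)
      set r := m % 10 with hrdef
      have hlast : (List.countP pvP [Nat.digitChar r] : Int)
          = (if ((r : Int) = 0 ∨ (r : Int) = 5) then 1 else 0) := by
        interval_cases r <;> decide
      push_cast
      rw [hlast]
      split_ifs <;> ring

theorem contar_ceros_y_cincos_spec : Claim_equal_contar_ceros_y_cincos := by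
  intro numero _
  unfold Spec_contar_ceros_y_cincos contar_ceros_y_cincos contar_ceros_y_cincos_alt
  by_cases h : numero ≤ 0
  · rw [contarA_go_nonpos _ _ (by omega)]
    simp [h]
  · rw [not_le] at h
    have hm : numero = ((numero.toNat : Nat) : Int) := by omega
    have hmpos : 0 < numero.toNat := by omega
    rw [hm, contarA_go_spec _ hmpos 0]
    have hnneg : ¬ ((numero.toNat : Int) < 0) := by omega
    simp only [if_neg (by omega : ¬ ((numero.toNat : Int) ≤ 0))]
    unfold PySem.Int.toChars
    rw [if_neg hnneg]
    rw [PySem.List.foldl_ite_add_one]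
    simp only [zero_add]
    rw [show ((numero.toNat : Int)).toNat = numero.toNat from Int.toNat_natCast _]
    rfl
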